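-- pv_equiv track=rewrite | github.com/hoichoigrowth/rag_testing | main.py | parse_multi_response
-- ===== SOURCE A (Python) =====
-- def parse_multi_response(response_text, num_questions):
--     """Parse the multi-question response into individual answers"""
--     answers = []
--     lines = response_text.strip().split('\n')
--
--     current_answer = ""
--     for line in lines:
--         if line.startswith('Q') and ':' in line:
--             if current_answer:
--                 answers.append(current_answer.strip())
--             current_answer = line.split(':', 1)[1].strip()
--         else:
--             current_answer += " " + line.strip()
--
--     if current_answer:
--         answers.append(current_answer.strip())
--
--     # Ensure we have the right number of answers
--     while len(answers) < num_questions: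
--         answers.append("Unable to extract answer from response")
--
--     return answers[:num_questions]
-- ===== SOURCE B (Python) =====
-- def _is_header(line):
--     return line.startswith('Q') and ':' in line
--
-- def _take_body(lines):
--     """Maximal header-free prefix, each line stripped, plus the remaining lines."""
--     body = []
--     i = 0
--     while i < len(lines) and not _is_header(lines[i]):
--         body.append(lines[i].strip())
--         i += 1
--     return body, lines[i:]
--
-- def parse_multi_response(response_text, num_questions):
--     """Parse the multi-question response into individual answers"""
--     lines = response_text.strip().split('\n')
--     body, rest = _take_body(lines)
--     answers = [' '.join(body).strip()] if body else []
--     while rest: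
--         head = rest[0].split(':', 1)[1].strip()
--         body, rest = _take_body(rest[1:])
--         if head or body:
--             answers.append(' '.join([head] + body).strip())
--     answers += ["Unable to extract answer from response"] * max(0, num_questions - len(answers))
--     return answers[:num_questions]
-- ===== Notes on version B (the rewrite author's own statement) =====
-- stated objective: alternative
-- what changed: A threads one accumulator string and an answers list through a single stateful fold; B first spans the lines into header-delimited segments (_take_body) and then joins each segment once with ' '.join, padding with a computed replicate instead of a while loop.
import Mathlib
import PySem

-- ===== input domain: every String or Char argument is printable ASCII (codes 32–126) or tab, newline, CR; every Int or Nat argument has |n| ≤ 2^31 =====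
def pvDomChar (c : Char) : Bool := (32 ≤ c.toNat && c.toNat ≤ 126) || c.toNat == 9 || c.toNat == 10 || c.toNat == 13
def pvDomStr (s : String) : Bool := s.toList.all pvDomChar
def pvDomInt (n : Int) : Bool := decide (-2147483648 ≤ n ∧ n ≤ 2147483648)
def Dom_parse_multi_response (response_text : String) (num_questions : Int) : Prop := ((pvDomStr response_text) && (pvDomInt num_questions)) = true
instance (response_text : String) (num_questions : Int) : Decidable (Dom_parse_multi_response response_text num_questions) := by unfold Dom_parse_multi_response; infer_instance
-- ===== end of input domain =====

-- B replaces A's single accumulator-string fold by a two-phase segmentation (span off each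
-- header-free block, then join each segment once); objective: alternative decomposition.

-- ===== PORT A =====
def pvHeaderA (line : String) : Bool :=
  PySem.Str.startswith line "Q" && PySem.Str.isIn ":" line

-- line.split(':', 1)[1].strip(): the guard ':' in line guarantees index 1 exists, so getD is exact here
def pvAfterColonA (line : String) : String :=
  PySem.Str.strip (PySem.List.pyGetD ((PySem.Str.splitMax? line ":" 1).getD []) 1 "")

-- loop state: (answers, current_answer)
def pvStepA (st : List String × String) (line : String) : List String × String :=
  if pvHeaderA line then
    ((if st.2 ≠ "" then st.1 ++ [PySem.Str.strip st.2] else st.1), pvAfterColonA line)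
  else
    (st.1, st.2 ++ " " ++ PySem.Str.strip line)

-- while len(answers) < num_questions: answers.append("Unable to extract answer from response")
def pvPadA (answers : List String) (n : Int) : List String :=
  if (answers.length : Int) < n then
    pvPadA (answers ++ ["Unable to extract answer from response"]) n
  else answers
termination_by (n - answers.length).toNat
decreasing_by simp; omega

def parse_multi_response (response_text : String) (num_questions : Int) : List String :=
  -- sep "\n" ≠ "" so split? is always some; getD is exact
  let lines := (PySem.Str.split? (PySem.Str.strip response_text) "\n").getD []
  let st := lines.foldl pvStepA ([], "")
  let answers := if st.2 ≠ "" then st.1 ++ [PySem.Str.strip st.2] else st.1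
  PySem.List.slice (pvPadA answers num_questions) none (some num_questions)

-- ===== PORT B =====
def pvIsHeaderB (line : String) : Bool :=
  PySem.Str.startswith line "Q" && PySem.Str.isIn ":" line

-- _take_body: maximal header-free prefix (each line stripped) and the remaining lines
def pvTakeBody : List String → List String × List String
  | [] => ([], [])
  | l :: ls =>
    if pvIsHeaderB l then ([], l :: ls)
    else
      let r := pvTakeBody ls
      (PySem.Str.strip l :: r.1, r.2)

-- needed by pvLoopB's termination proof
theorem pvTakeBody_rest_length_le (ls : List String) : (pvTakeBody ls).2.length ≤ ls.length := by
  induction ls with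
  | nil => simp [pvTakeBody]
  | cons l ls ih =>
    simp only [pvTakeBody]
    split
    · simp
    · simpa using Nat.le_succ_of_le ih

-- rest[0].split(':', 1)[1].strip(): ':' in a header line, so index 1 exists and getD is exact
def pvHeadB (line : String) : String :=
  PySem.Str.strip (PySem.List.pyGetD ((PySem.Str.splitMax? line ":" 1).getD []) 1 "")

def pvLoopB : List String → List String
  | [] => []
  | h :: t =>
    let head := pvHeadB h
    let br := pvTakeBody t
    (if head ≠ "" ∨ br.1 ≠ [] then [PySem.Str.strip (PySem.Str.join " " (head :: br.1))] else [])
      ++ pvLoopB br.2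
termination_by lines => lines.length
decreasing_by
  have := pvTakeBody_rest_length_le t
  simp only [List.length_cons]; omega

def parse_multi_response_alt (response_text : String) (num_questions : Int) : List String :=
  let lines := (PySem.Str.split? (PySem.Str.strip response_text) "\n").getD []
  let p := pvTakeBody lines
  let answers :=
    (if p.1 ≠ [] then [PySem.Str.strip (PySem.Str.join " " p.1)] else []) ++ pvLoopB p.2
  let padded :=
    answers ++ List.replicate (max 0 (num_questions - answers.length)).toNat
      "Unable to extract answer from response"
  PySem.List.slice padded none (some num_questions)

-- ===== PRECONDITION & SPEC =====
def Spec_parse_multi_response (response_text : String) (num_questions : Int) (out : List String) : Prop := out = parse_multi_response_alt response_text num_questions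
instance (response_text : String) (num_questions : Int) (out : List String) : Decidable (Spec_parse_multi_response response_text num_questions out) := by unfold Spec_parse_multi_response; infer_instance

-- ===== CLAIM (what is proved, stated in full; the proofs are below) =====
def Claim_equal_parse_multi_response : Prop := ∀ (response_text : String) (num_questions : Int), Dom_parse_multi_response response_text num_questions → Spec_parse_multi_response response_text num_questions (parse_multi_response response_text num_questions)

-- ===== LEMMAS AND PROOFS =====

theorem pvLoopB_nil : pvLoopB [] = [] := by
  conv_lhs => unfold pvLoopB

theorem pvLoopB_cons (l : String) (ls : List String) : pvLoopB (l :: ls) =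
    (if pvHeadB l ≠ "" ∨ (pvTakeBody ls).1 ≠ [] then
      [PySem.Str.strip (PySem.Str.join " " (pvHeadB l :: (pvTakeBody ls).1))] else [])
    ++ pvLoopB (pvTakeBody ls).2 := by
  conv_lhs => unfold pvLoopB

-- A's 'current_answer' after absorbing a block of (already stripped) body lines
def pvConcat (cur : String) (body : List String) : String :=
  body.foldl (fun s b => s ++ " " ++ b) cur

theorem pvConcat_cons (cur b : String) (bs : List String) :
    pvConcat cur (b :: bs) = pvConcat (cur ++ " " ++ b) bs := rfl

theorem pvAppend_space_ne_empty (s b : String) : s ++ " " ++ b ≠ "" := by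
  intro h
  have h' := congrArg PySem.Str.len h
  simp only [PySem.Str.len_eq] at h'
  simp at h'
  omega

theorem pvConcat_prepend (bs : List String) (x y : String) :
    pvConcat (x ++ y) bs = x ++ pvConcat y bs := by
  induction bs generalizing y with
  | nil => rfl
  | cons b bs ih =>
    rw [pvConcat_cons, pvConcat_cons,
      show x ++ y ++ " " ++ b = x ++ (y ++ " " ++ b) from by
        simp [String.append_assoc], ih]

theorem pvJoin_eq_pvConcat (bs : List String) (c : String) :
    PySem.Str.join " " (c :: bs) = pvConcat c bs := by
  induction bs generalizing c with
  | nil =>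
    apply String.toList_inj.mp
    simp only [PySem.Str.toList_join, List.map]
    exact PySem.Chars.join_singleton _ _
  | cons b bs ih =>
    have hstep : PySem.Str.join " " (c :: b :: bs) = c ++ " " ++ PySem.Str.join " " (b :: bs) := by
      apply String.toList_inj.mp
      simp only [PySem.Str.toList_join, List.map, String.toList_append]
      exact PySem.Chars.join_cons_cons _ _ _ _
    rw [hstep, ih, pvConcat_cons, pvConcat_prepend]

theorem pvStrip_space (s : String) : PySem.Str.strip (" " ++ s) = PySem.Str.strip s := by
  apply String.toList_inj.mp
  simp only [PySem.Str.toList_strip, String.toList_append]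
  have h1 : (" " : String).toList = [' '] := rfl
  rw [h1]
  simp [PySem.Chars.strip, PySem.Chars.lstrip,
    show PySem.Chars.isspace ' ' = true from by decide]

-- A's final 'if current_answer: answers.append(current_answer.strip())'
def pvFinishA (st : List String × String) : List String :=
  if st.2 ≠ "" then st.1 ++ [PySem.Str.strip st.2] else st.1

theorem pvFinishA_eq (acc : List String) (cur : String) :
    pvFinishA (acc, cur) = acc ++ (if cur ≠ "" then [PySem.Str.strip cur] else []) := by
  simp only [pvFinishA]
  split <;> simp

-- what A's fold produces from state (·, cur) on the remaining lines, phrased segment-wise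
def pvBridge (cur : String) (lines : List String) : List String :=
  (if cur ≠ "" ∨ (pvTakeBody lines).1 ≠ [] then
    [PySem.Str.strip (pvConcat cur (pvTakeBody lines).1)] else [])
  ++ pvLoopB (pvTakeBody lines).2

theorem pvHeader_eq (l : String) : pvIsHeaderB l = pvHeaderA l := rfl

theorem pvTakeBody_header (l : String) (ls : List String) (hh : pvHeaderA l = true) :
    pvTakeBody (l :: ls) = ([], l :: ls) := by
  simp [pvTakeBody, pvHeader_eq, hh]

theorem pvTakeBody_body (l : String) (ls : List String) (hh : ¬ pvHeaderA l = true) :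
    pvTakeBody (l :: ls) = (PySem.Str.strip l :: (pvTakeBody ls).1, (pvTakeBody ls).2) := by
  simp [pvTakeBody, pvHeader_eq, hh]

theorem pvMain (lines : List String) (acc : List String) (cur : String) :
    pvFinishA (lines.foldl pvStepA (acc, cur)) = acc ++ pvBridge cur lines := by
  induction lines generalizing acc cur with
  | nil =>
    simp only [List.foldl_nil, pvFinishA_eq, pvBridge, pvTakeBody, pvLoopB_nil]
    by_cases hc : cur = "" <;> simp [hc, pvConcat]
  | cons l ls ih =>
    by_cases hh : pvHeaderA l = true
    · have hstep : pvStepA (acc, cur) l = (pvFinishA (acc, cur), pvAfterColonA l) := by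
        simp [pvStepA, hh, pvFinishA]
      have hhd : pvHeadB l = pvAfterColonA l := rfl
      rw [List.foldl_cons, hstep, ih, pvFinishA_eq]
      simp only [pvBridge, pvTakeBody_header l ls hh, pvLoopB_cons, hhd,
        pvJoin_eq_pvConcat, pvConcat]
      by_cases hc : cur = "" <;> simp [hc, List.append_assoc]
    · have hstep : pvStepA (acc, cur) l = (acc, cur ++ " " ++ PySem.Str.strip l) := by
        simp [pvStepA, hh]
      rw [List.foldl_cons, hstep, ih]
      congr 1
      simp only [pvBridge, pvTakeBody_body l ls hh, pvConcat_cons]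
      have hne : (cur ++ " " ++ PySem.Str.strip l) ≠ "" := pvAppend_space_ne_empty _ _
      rw [if_pos (Or.inl hne), if_pos (Or.inr (by simp))]

theorem pvBridge_zero (lines : List String) :
    pvBridge "" lines =
      (if (pvTakeBody lines).1 ≠ [] then
        [PySem.Str.strip (PySem.Str.join " " (pvTakeBody lines).1)] else [])
      ++ pvLoopB (pvTakeBody lines).2 := by
  simp only [pvBridge]
  congr 1
  cases hb : (pvTakeBody lines).1 with
  | nil => simp
  | cons x xs =>
    have h1 : pvConcat "" (x :: xs) = " " ++ pvConcat x xs := by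
      rw [pvConcat_cons]
      have h2 : ("" : String) ++ " " ++ x = " " ++ x := by
        rw [String.append_assoc]; simp
      rw [h2, pvConcat_prepend]
    rw [h1, pvStrip_space, pvJoin_eq_pvConcat]
    simp

theorem pvPad_eq (n : Int) (answers : List String) :
    pvPadA answers n =
      answers ++ List.replicate (max 0 (n - answers.length)).toNat
        "Unable to extract answer from response" := by
  rw [pvPadA]
  split
  · rename_i hlt
    rw [pvPad_eq]
    simp only [List.length_append, List.length_cons, List.length_nil]
    rw [List.append_assoc]
    congr 1
    have hk : (max 0 (n - ((answers.length : Int) + 1))).toNat + 1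
        = (max 0 (n - answers.length)).toNat := by omega
    rw [← hk, List.replicate_succ]
    simp
  · rename_i hge
    have h0 : (max 0 (n - answers.length)).toNat = 0 := by omega
    simp [h0]
termination_by (n - answers.length).toNat
decreasing_by simp; omega

-- ===== VERDICT (by name: the statement is the Claim_ definition above) =====
theorem parse_multi_response_spec : Claim_equal_parse_multi_response := by
  intro response_text num_questions _
  unfold Spec_parse_multi_response parse_multi_response parse_multi_response_alt
  have L := (PySem.Str.split? (PySem.Str.strip response_text) "\n").getD []
  show PySem.List.slice
      (pvPadA (pvFinishA (((PySem.Str.split? (PySem.Str.strip response_text) "\n").getD []).foldl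
        pvStepA ([], ""))) num_questions) none (some num_questions) = _
  rw [pvMain _ [] "", List.nil_append, pvBridge_zero, pvPad_eq]
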